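-- pv_equiv track=rewrite | github.com/petaripenev/SIP | scripts/randomize_SIP.py | find_and_remove_failed_shuffles
-- ===== SOURCE A (Python) =====
-- def check_replicates(groupedEntries:list):
--     '''Checks a list for repeated replicate samples.
--     For example HB4_D2... and HA4_D2...'''
--     removed_isotope_incubationLength = [x[:6] for x in groupedEntries]
--     removed_replicate_identifier = [x[0]+x[2:] for x in removed_isotope_incubationLength]
--     return len(set(removed_replicate_identifier)) < len(groupedEntries)
--
-- def check_weights(groupedEntries:list):
--     '''Checks a list for even number of D1-2 samples.'''
--     d1_or_d2, d3 = list(), list()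
--     for x in groupedEntries:
--         if '_D1_' in x or '_D2_' in x:
--             d1_or_d2.append(x)
--         if '_D3_' in x:
--             d3.append(x)
--     return len(d1_or_d2) % 2 != 0 or len(d3) % 2 != 0
--
-- def find_and_remove_failed_shuffles(list_of_groupedEntries:list):
--     '''Finds groups of entries where the repeated replicate rule fails,
--     then removes these entries from the original list and returns them as
--     separate list in addition to the succeeded list'''
--     removal_idx, failed_shuffles = list(), list()
--     for i, x in enumerate(list_of_groupedEntries):
--         if check_replicates(x) or check_weights(x):
--             removal_idx.append(i)
--             failed_shuffles.append(x)
--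
--     list_of_groupedEntries_withoutFails = [ele for idx, ele in enumerate(list_of_groupedEntries) if idx not in removal_idx]
--     return list_of_groupedEntries_withoutFails, failed_shuffles
-- ===== SOURCE B (Python) =====
-- def check_replicates(groupedEntries:list):
--     '''Checks a list for repeated replicate samples.
--     For example HB4_D2... and HA4_D2...'''
--     removed_isotope_incubationLength = [x[:6] for x in groupedEntries]
--     removed_replicate_identifier = [x[0]+x[2:] for x in removed_isotope_incubationLength]
--     return len(set(removed_replicate_identifier)) < len(groupedEntries)
--
-- def check_weights(groupedEntries:list):
--     '''Checks a list for even number of D1-2 samples.'''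
--     d1_or_d2, d3 = list(), list()
--     for x in groupedEntries:
--         if '_D1_' in x or '_D2_' in x:
--             d1_or_d2.append(x)
--         if '_D3_' in x:
--             d3.append(x)
--     return len(d1_or_d2) % 2 != 0 or len(d3) % 2 != 0
--
-- def find_and_remove_failed_shuffles(list_of_groupedEntries:list):
--     '''Single-pass partition: each group goes to failed if a rule fires, else to passing.'''
--     passing, failed_shuffles = list(), list()
--     for x in list_of_groupedEntries:
--         if check_replicates(x) or check_weights(x):
--             failed_shuffles.append(x)
--         else:
--             passing.append(x)
--     return passing, failed_shuffles
-- ===== Notes on version B (the rewrite author's own statement) =====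
-- stated objective: simpler
-- what changed: Replaced the two-pass scheme (collect failing indices, then re-scan with an O(k) 'idx not in removal_idx' membership test per element) by a single-pass partition that appends each group directly to the passing or failed list.
import Mathlib
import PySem

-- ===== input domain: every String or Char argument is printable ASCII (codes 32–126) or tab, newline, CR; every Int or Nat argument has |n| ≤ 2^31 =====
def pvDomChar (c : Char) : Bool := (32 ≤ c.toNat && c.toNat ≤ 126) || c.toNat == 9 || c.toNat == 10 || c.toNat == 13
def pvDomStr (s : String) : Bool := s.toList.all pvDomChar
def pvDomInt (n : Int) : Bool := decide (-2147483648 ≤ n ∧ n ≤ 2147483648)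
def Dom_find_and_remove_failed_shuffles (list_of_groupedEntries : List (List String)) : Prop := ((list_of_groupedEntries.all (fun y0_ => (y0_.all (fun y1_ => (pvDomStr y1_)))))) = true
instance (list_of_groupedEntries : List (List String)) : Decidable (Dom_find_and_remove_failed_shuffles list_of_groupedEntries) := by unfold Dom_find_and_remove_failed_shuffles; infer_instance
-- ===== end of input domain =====

-- B is a single-pass partition of the groups (simpler: no index list, no second filtering pass);
-- the rule helpers check_replicates / check_weights are shared verbatim by both versions.

-- ===== PORT A =====
-- shared helper: check_replicates(groupedEntries); x[0] on the truncated identifier is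
-- pyGetD … 0 ' ' — total here only because Pre_ excludes empty strings (where Python raises IndexError)
def check_replicates (groupedEntries : List String) : Bool :=
  let removed_isotope_incubationLength :=
    groupedEntries.map (fun x => PySem.List.slice x.toList none (some 6))
  let removed_replicate_identifier :=
    removed_isotope_incubationLength.map
      (fun x => PySem.List.pyGetD x 0 ' ' :: PySem.List.slice x (some 2) none)
  decide ((PySem.Set.ofList removed_replicate_identifier).length < groupedEntries.length)

-- shared helper: check_weights(groupedEntries)
def check_weights (groupedEntries : List String) : Bool :=
  let st := groupedEntries.foldl
    (fun (acc : List String × List String) x =>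
      let acc := if PySem.Str.isIn "_D1_" x || PySem.Str.isIn "_D2_" x
                 then (acc.1 ++ [x], acc.2) else acc
      if PySem.Str.isIn "_D3_" x then (acc.1, acc.2 ++ [x]) else acc)
    ([], [])
  decide (st.1.length % 2 ≠ 0) || decide (st.2.length % 2 ≠ 0)

def find_and_remove_failed_shuffles (list_of_groupedEntries : List (List String)) :
    List (List String) × List (List String) :=
  -- first loop: collect removal indices and failed groups over enumerate
  let st := (PySem.List.enumerate list_of_groupedEntries).foldl
    (fun (acc : List Int × List (List String)) p =>
      if check_replicates p.2 || check_weights p.2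
      then (acc.1 ++ [p.1], acc.2 ++ [p.2]) else acc)
    ([], [])
  -- comprehension: [ele for idx, ele in enumerate(…) if idx not in removal_idx]
  let list_of_groupedEntries_withoutFails :=
    ((PySem.List.enumerate list_of_groupedEntries).filter
      (fun p => decide (p.1 ∉ st.1))).map (·.2)
  (list_of_groupedEntries_withoutFails, st.2)

-- ===== PORT B =====
def find_and_remove_failed_shuffles_alt (list_of_groupedEntries : List (List String)) :
    List (List String) × List (List String) :=
  list_of_groupedEntries.foldl
    (fun (acc : List (List String) × List (List String)) x =>
      if check_replicates x || check_weights x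
      then (acc.1, acc.2 ++ [x]) else (acc.1 ++ [x], acc.2))
    ([], [])

-- ===== PRECONDITION & SPEC =====
-- Pre_ excludes exactly the inputs where Python A raises: a group containing the empty
-- string makes check_replicates evaluate ''[0], an IndexError (B's helpers raise there too).
def Pre_find_and_remove_failed_shuffles (list_of_groupedEntries : List (List String)) : Prop :=
  ∀ g ∈ list_of_groupedEntries, ∀ s ∈ g, s.toList ≠ []
instance (list_of_groupedEntries : List (List String)) : Decidable (Pre_find_and_remove_failed_shuffles list_of_groupedEntries) := by unfold Pre_find_and_remove_failed_shuffles; infer_instance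
def pvWitness_find_and_remove_failed_shuffles : List (List String) :=
  [["HB4_D1_w1", "HA5_D2_w2"], ["HB4_D3_w3"]]

def Spec_find_and_remove_failed_shuffles (list_of_groupedEntries : List (List String)) (out : List (List String) × List (List String)) : Prop := out = find_and_remove_failed_shuffles_alt list_of_groupedEntries
instance (list_of_groupedEntries : List (List String)) (out : List (List String) × List (List String)) : Decidable (Spec_find_and_remove_failed_shuffles list_of_groupedEntries out) := by unfold Spec_find_and_remove_failed_shuffles; infer_instance

-- ===== CLAIM (what is proved, stated in full; the proofs are below) =====
def Claim_equal_find_and_remove_failed_shuffles : Prop := ∀ (list_of_groupedEntries : List (List String)), Dom_find_and_remove_failed_shuffles list_of_groupedEntries → Pre_find_and_remove_failed_shuffles list_of_groupedEntries → Spec_find_and_remove_failed_shuffles list_of_groupedEntries (find_and_remove_failed_shuffles list_of_groupedEntries)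

-- ===== LEMMAS AND PROOFS =====

-- the partition predicate both versions test
def pvFails (x : List String) : Bool := check_replicates x || check_weights x

-- B's single loop computes (passing, failing) = (filter ¬fails, filter fails)
theorem pvB_loop (l : List (List String)) (acc : List (List String) × List (List String)) :
    l.foldl
      (fun (acc : List (List String) × List (List String)) x =>
        if check_replicates x || check_weights x
        then (acc.1, acc.2 ++ [x]) else (acc.1 ++ [x], acc.2)) acc
    = (acc.1 ++ l.filter (fun x => !pvFails x), acc.2 ++ l.filter pvFails) := by
  induction l generalizing acc with
  | nil => simp
  | cons x xs ih =>
    rw [List.foldl_cons, ih]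
    cases hc : check_replicates x <;> cases hw : check_weights x <;>
      simp [pvFails, hc, hw]

-- A's first loop: failed list is filter fails, removal_idx is the indices of failing pairs
theorem pvA_loop1 (l : List (List String)) (s : Int) (acc : List Int × List (List String)) :
    (PySem.List.enumerate l s).foldl
      (fun (acc : List Int × List (List String)) p =>
        if check_replicates p.2 || check_weights p.2
        then (acc.1 ++ [p.1], acc.2 ++ [p.2]) else acc) acc
    = (acc.1 ++ (((PySem.List.enumerate l s).filter (fun p => pvFails p.2)).map (·.1)),
       acc.2 ++ l.filter pvFails) := by
  induction l generalizing s acc with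
  | nil => simp [PySem.List.enumerate]
  | cons x xs ih =>
    rw [PySem.List.enumerate_cons, List.foldl_cons, ih]
    by_cases h : (check_replicates x || check_weights x) = true <;>
      simp [pvFails, h]

-- membership in the index list of failing pairs
theorem pvIdx_mem (l : List (List String)) (s i : Int) :
    i ∈ ((PySem.List.enumerate l s).filter (fun p => pvFails p.2)).map (·.1) ↔
      ∃ (k : Nat), ∃ _ : k < l.length, i = s + k ∧ pvFails l[k] = true := by
  constructor
  · intro h
    rcases List.mem_map.mp h with ⟨p, hp, hfst⟩
    rcases List.mem_filter.mp hp with ⟨hmem, hfail⟩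
    rcases (PySem.List.mem_enumerate_iff l s p).mp hmem with ⟨k, hk, hpe⟩
    subst hpe
    exact ⟨k, hk, hfst.symm, hfail⟩
  · rintro ⟨k, hk, rfl, hfail⟩
    refine List.mem_map.mpr ⟨(s + k, l[k]), List.mem_filter.mpr ⟨?_, hfail⟩, rfl⟩
    exact (PySem.List.mem_enumerate_iff l s _).mpr ⟨k, hk, rfl⟩

-- keeping the pairs whose index is not a removal index keeps exactly the non-failing groups
theorem pvA_loop2 (l : List (List String)) (R : List Int)
    (hR : ∀ (i : Int) (x : List String),
        (i, x) ∈ PySem.List.enumerate l 0 → (i ∈ R ↔ pvFails x = true)) :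
    ((PySem.List.enumerate l 0).filter (fun p => decide (p.1 ∉ R))).map (·.2)
      = l.filter (fun x => !pvFails x) := by
  have hcong : ∀ p ∈ PySem.List.enumerate l 0,
      decide (p.1 ∉ R) = !pvFails p.2 := by
    intro p hp
    have := hR p.1 p.2 hp
    by_cases h : pvFails p.2 = true <;> simp_all
  rw [List.filter_congr hcong]
  -- now pure shape: map snd of filter on snd over enumerate = filter on the list
  have : ∀ (l : List (List String)) (s : Int),
      ((PySem.List.enumerate l s).filter (fun p => !pvFails p.2)).map (·.2)
        = l.filter (fun x => !pvFails x) := by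
    intro l
    induction l with
    | nil => intro s; simp [PySem.List.enumerate]
    | cons x xs ih =>
      intro s
      rw [PySem.List.enumerate_cons]
      by_cases h : pvFails x = true <;> simp [h, ih]
  exact this l 0

-- ===== VERDICT (by name: the statement is the Claim_ definition above) =====
theorem find_and_remove_failed_shuffles_spec : Claim_equal_find_and_remove_failed_shuffles := by
  intro l _ _
  show find_and_remove_failed_shuffles l = find_and_remove_failed_shuffles_alt l
  unfold find_and_remove_failed_shuffles find_and_remove_failed_shuffles_alt
  rw [pvB_loop, pvA_loop1]
  simp only [List.nil_append]
  refine Prod.ext ?_ rfl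
  apply pvA_loop2
  intro i x hmem
  rcases (PySem.List.mem_enumerate_iff l 0 (i, x)).mp hmem with ⟨k, hk, hpe⟩
  have hi : i = (k : Int) := by simpa using congrArg Prod.fst hpe
  have hx : x = l[k] := congrArg Prod.snd hpe
  rw [pvIdx_mem]
  constructor
  · rintro ⟨k', hk', hik', hf⟩
    have : k = k' := by omega
    subst this; rw [hx]; exact hf
  · intro hf
    exact ⟨k, hk, by omega, by rw [← hx]; exact hf⟩
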